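-- pv_equiv track=rewrite | github.com/khushi-070906/MULTI-AGENT-RESEARCH | app.py | split_feedback
-- ===== SOURCE A (Python) =====
-- from typing import Dict, Any, Optional
--
-- def split_feedback(feedback_text: str) -> Dict[str, str]:
--     """Parse strengths, weaknesses, and improvements from critic feedback."""
--     sections = {"strengths": "", "weaknesses": "", "improvements": ""}
--     current = None
--     lines = []
--
--     for line in feedback_text.splitlines():
--         lower_line = line.lower()
--         if "strength" in lower_line:
--             if current and lines:
--                 sections[current] = "\n".join(lines).strip()
--             current, lines = "strengths", []
--         elif "weakness" in lower_line or "limitation" in lower_line: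
--             if current and lines:
--                 sections[current] = "\n".join(lines).strip()
--             current, lines = "weaknesses", []
--         elif "improve" in lower_line or "recommend" in lower_line or "suggest" in lower_line:
--             if current and lines:
--                 sections[current] = "\n".join(lines).strip()
--             current, lines = "improvements", []
--         elif current:
--             lines.append(line)
--
--     if current and lines:
--         sections[current] = "\n".join(lines).strip()
--
--     # Fallback: dump everything into strengths if no structure detected
--     if not any(sections.values()):
--         sections["strengths"] = feedback_text
--
--     return sections
-- ===== SOURCE B (Python) =====
-- def _classify(line):
--     low = line.lower()
--     if "strength" in low:
--         return "strengths"
--     if "weakness" in low or "limitation" in low: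
--         return "weaknesses"
--     if "improve" in low or "recommend" in low or "suggest" in low:
--         return "improvements"
--     return None
--
--
-- def split_feedback(feedback_text: str):
--     """Parse strengths, weaknesses, and improvements from critic feedback."""
--     sections = {"strengths": "", "weaknesses": "", "improvements": ""}
--     rest = feedback_text.splitlines()
--     while rest:
--         name = _classify(rest[0])
--         rest = rest[1:]
--         if name is None:
--             continue
--         body = []
--         while rest and _classify(rest[0]) is None:
--             body.append(rest[0])
--             rest = rest[1:]
--         if body:
--             sections[name] = "\n".join(body).strip()
--     if not any(sections.values()):
--         sections["strengths"] = feedback_text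
--     return sections
-- ===== Notes on version B (the rewrite author's own statement) =====
-- stated objective: simpler
-- what changed: A threads a (current-section, pending-lines) state machine through every line with flush-on-header logic repeated in three branches plus a trailing flush; B classifies a line once in a helper and processes the text header-by-header, taking each body as one contiguous span and assigning it immediately, so there is no carried accumulator and no final flush.
import Mathlib
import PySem

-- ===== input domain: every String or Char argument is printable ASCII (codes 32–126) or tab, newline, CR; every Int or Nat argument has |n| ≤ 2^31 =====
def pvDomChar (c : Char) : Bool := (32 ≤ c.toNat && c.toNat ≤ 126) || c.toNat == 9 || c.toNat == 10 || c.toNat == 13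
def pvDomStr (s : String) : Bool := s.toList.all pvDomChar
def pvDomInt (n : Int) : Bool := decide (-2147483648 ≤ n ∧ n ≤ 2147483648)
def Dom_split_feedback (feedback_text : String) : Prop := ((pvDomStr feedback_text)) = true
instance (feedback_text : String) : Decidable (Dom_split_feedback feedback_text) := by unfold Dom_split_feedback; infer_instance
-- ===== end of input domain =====

-- B replaces A's one-pass current/accumulator state machine by a header-then-block
-- decomposition (skip to each header, take the body lines in one span, assign at once);
-- objective: simpler, same cost.

-- ===== PORT A =====
-- loop body of A's for-loop, one step over the state (sections, current, lines)
def pvStepA (st : PySem.Dict String String × Option String × List String) (line : String) :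
    PySem.Dict String String × Option String × List String :=
  let d := st.1
  let cur := st.2.1
  let lns := st.2.2
  let lowerLine := PySem.Str.lower line
  -- 'if current and lines: sections[current] = "\n".join(lines).strip()' (pure, so hoisted as a let)
  let flushed : PySem.Dict String String :=
    match cur with
    | some c => if lns.isEmpty then d else d.insert c (PySem.Str.strip (PySem.Str.join "\n" lns))
    | none => d
  if PySem.Str.isIn "strength" lowerLine then
    (flushed, some "strengths", ([] : List String))
  else if PySem.Str.isIn "weakness" lowerLine || PySem.Str.isIn "limitation" lowerLine then
    (flushed, some "weaknesses", ([] : List String))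
  else if PySem.Str.isIn "improve" lowerLine || PySem.Str.isIn "recommend" lowerLine
      || PySem.Str.isIn "suggest" lowerLine then
    (flushed, some "improvements", ([] : List String))
  else
    match cur with
    | some _ => (d, cur, lns ++ [line])
    | none => (d, cur, lns)

def split_feedback (feedback_text : String) : List (String × String) :=
  let d0 : PySem.Dict String String :=
    PySem.Dict.ofList [("strengths", ""), ("weaknesses", ""), ("improvements", "")]
  let st := (PySem.Str.splitlines feedback_text).foldl pvStepA (d0, none, [])
  -- trailing 'if current and lines: sections[current] = ...'
  let d1 : PySem.Dict String String :=
    match st.2.1 with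
    | some c => if st.2.2.isEmpty then st.1
                else st.1.insert c (PySem.Str.strip (PySem.Str.join "\n" st.2.2))
    | none => st.1
  let d2 := if d1.values.any (fun v => !(v == "")) then d1
            else d1.insert "strengths" feedback_text
  d2.items

-- ===== PORT B =====
def pvClassify (line : String) : Option String :=
  let low := PySem.Str.lower line
  if PySem.Str.isIn "strength" low then some "strengths"
  else if PySem.Str.isIn "weakness" low || PySem.Str.isIn "limitation" low then some "weaknesses"
  else if PySem.Str.isIn "improve" low || PySem.Str.isIn "recommend" low
      || PySem.Str.isIn "suggest" low then some "improvements"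
  else none

-- B's outer 'while rest:' loop; the inner body-collecting while is the takeWhile/dropWhile span
def pvLoopB (d : PySem.Dict String String) : List String → PySem.Dict String String
  | [] => d
  | l :: ls =>
    match pvClassify l with
    | none => pvLoopB d ls
    | some name =>
      let body := ls.takeWhile (fun x => (pvClassify x).isNone)
      let rest := ls.dropWhile (fun x => (pvClassify x).isNone)
      pvLoopB (if body.isEmpty then d
               else d.insert name (PySem.Str.strip (PySem.Str.join "\n" body))) rest
termination_by ls => ls.length
decreasing_by
  all_goals
    have := List.length_dropWhile_le (fun x => (pvClassify x).isNone) ls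
    simp_all

def split_feedback_alt (feedback_text : String) : List (String × String) :=
  let d0 : PySem.Dict String String :=
    PySem.Dict.ofList [("strengths", ""), ("weaknesses", ""), ("improvements", "")]
  let d := pvLoopB d0 (PySem.Str.splitlines feedback_text)
  let d2 := if d.values.any (fun v => !(v == "")) then d
            else d.insert "strengths" feedback_text
  d2.items

-- ===== PRECONDITION & SPEC =====
def Spec_split_feedback (feedback_text : String) (out : List (String × String)) : Prop := out = split_feedback_alt feedback_text
instance (feedback_text : String) (out : List (String × String)) : Decidable (Spec_split_feedback feedback_text out) := by unfold Spec_split_feedback; infer_instance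

-- ===== CLAIM (what is proved, stated in full; the proofs are below) =====
def Claim_equal_split_feedback : Prop := ∀ (feedback_text : String), Dom_split_feedback feedback_text → Spec_split_feedback feedback_text (split_feedback feedback_text)

-- ===== LEMMAS AND PROOFS =====

-- flush-if-nonempty, shared shape of A's flush and B's block assignment
def pvInsertIf (d : PySem.Dict String String) (k : String) (b : List String) :
    PySem.Dict String String :=
  if b.isEmpty then d else d.insert k (PySem.Str.strip (PySem.Str.join "\n" b))

-- A's final flush applied to a loop state
def pvFinishA (st : PySem.Dict String String × Option String × List String) :
    PySem.Dict String String :=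
  match st.2.1 with
  | some c => pvInsertIf st.1 c st.2.2
  | none => st.1

theorem pvStepA_eq (st : PySem.Dict String String × Option String × List String) (line : String) :
    pvStepA st line =
      (match pvClassify line with
      | some k => (pvFinishA st, some k, ([] : List String))
      | none =>
        match st.2.1 with
        | some _ => (st.1, st.2.1, st.2.2 ++ [line])
        | none => st) := by
  cases st with
  | mk d rest =>
    cases rest with
    | mk cur lns =>
      simp only [pvStepA, pvClassify, pvFinishA, pvInsertIf]
      split_ifs <;> cases cur <;> rfl

theorem pvMain (ls : List String) :
    ∀ (d : PySem.Dict String String) (cur : Option String) (acc : List String),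
      (cur = none → acc = []) →
      pvFinishA (ls.foldl pvStepA (d, cur, acc)) =
        match cur with
        | none => pvLoopB d ls
        | some k =>
            pvLoopB (pvInsertIf d k (acc ++ ls.takeWhile (fun x => (pvClassify x).isNone)))
              (ls.dropWhile (fun x => (pvClassify x).isNone)) := by
  induction ls with
  | nil =>
    intro d cur acc h
    cases cur with
    | none => simp [pvFinishA, h rfl, pvLoopB]
    | some k => simp [pvFinishA, pvLoopB]
  | cons l ls ih =>
    intro d cur acc h
    rw [List.foldl_cons, pvStepA_eq]
    rcases hc : pvClassify l with _ | k'
    · -- l is not a header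
      cases cur with
      | none =>
        simp only
        have := ih d none acc h
        simp only at this
        rw [this]
        conv_rhs => rw [pvLoopB.eq_def]
        simp [hc]
      | some k =>
        simp only
        have := ih d (some k) (acc ++ [l]) (by simp)
        simp only at this
        rw [this, List.takeWhile_cons, List.dropWhile_cons]
        simp [hc]
    · -- l is a header classified k'
      simp only
      have := ih (pvFinishA (d, cur, acc)) (some k') [] (by simp)
      simp only at this
      rw [this]
      cases cur with
      | none =>
        simp only [pvFinishA]
        conv_rhs => rw [pvLoopB.eq_def]
        simp [hc, pvInsertIf]
      | some k =>
        simp only [pvFinishA]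
        conv_rhs => rw [pvLoopB.eq_def]
        simp [hc, pvInsertIf]

-- ===== VERDICT (by name: the statement is the Claim_ definition above) =====
theorem split_feedback_spec : Claim_equal_split_feedback := by
  intro t _
  simp only [Spec_split_feedback, split_feedback, split_feedback_alt]
  have := pvMain (PySem.Str.splitlines t)
    (PySem.Dict.ofList [("strengths", ""), ("weaknesses", ""), ("improvements", "")])
    none [] (fun _ => rfl)
  simp only at this
  simp only [pvFinishA, pvInsertIf] at this
  rw [← this]
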